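-- pv_equiv track=rewrite | github.com/pataluc/AoC | 2025/everybodyCodes/day06/ex.py | part1
-- ===== SOURCE A (Python) =====
-- def part1(professions: str) -> int:
--     mentor_count = 0
--     result = 0
--     for i in list(professions):
--         if i == 'A':
--             mentor_count += 1
--         elif i == 'a':
--             result += mentor_count
--     return result
-- ===== SOURCE B (Python) =====
-- def part1(professions: str) -> int:
--     # Pass 1: materialize a prefix table of how many 'A's appear up to each index.
--     counts = []
--     c = 0
--     for ch in professions:
--         if ch == 'A':
--             c += 1
--         counts.append(c)
--     # Pass 2: sum the table entries at the 'a' positions.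
--     return sum(counts[i] for i, ch in enumerate(professions) if ch == 'a')
-- ===== Notes on version B (the rewrite author's own statement) =====
-- stated objective: alternative
-- what changed: Replaces the single interleaved accumulator loop with a two-pass scheme: first materialize a prefix-sum table of 'A' counts, then sum its entries at the 'a' positions.
import Mathlib
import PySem

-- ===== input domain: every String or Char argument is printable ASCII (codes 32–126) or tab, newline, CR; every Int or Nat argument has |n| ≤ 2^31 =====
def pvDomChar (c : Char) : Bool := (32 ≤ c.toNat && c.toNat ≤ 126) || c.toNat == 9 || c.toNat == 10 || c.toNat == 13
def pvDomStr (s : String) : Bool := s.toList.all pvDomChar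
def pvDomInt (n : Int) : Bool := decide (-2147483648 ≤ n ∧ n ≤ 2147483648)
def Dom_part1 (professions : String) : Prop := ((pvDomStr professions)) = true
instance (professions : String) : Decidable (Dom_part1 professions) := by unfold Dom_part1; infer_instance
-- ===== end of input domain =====

-- ===== PORT A =====
def part1 (professions : String) : Int :=
  (professions.toList.foldl
    (fun (st : Int × Int) i =>
      if i = 'A' then (st.1 + 1, st.2)
      else if i = 'a' then (st.1, st.2 + st.1)
      else st)
    (0, 0)).2

-- ===== PORT B =====
-- prefix table: number of 'A's seen up to (and including) each index
def altCounts : List Char → Int → List Int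
  | [], _ => []
  | ch :: rest, c =>
    let c' := if ch = 'A' then c + 1 else c
    c' :: altCounts rest c'

def part1_alt (professions : String) : Int :=
  let counts := altCounts professions.toList 0
  (List.zip counts professions.toList).foldl
    (fun s p => if p.2 = 'a' then s + p.1 else s) 0

-- ===== PRECONDITION & SPEC =====
def Spec_part1 (professions : String) (out : Int) : Prop := out = part1_alt professions
instance (professions : String) (out : Int) : Decidable (Spec_part1 professions out) := by unfold Spec_part1; infer_instance

-- ===== CLAIM (what is proved, stated in full; the proofs are below) =====
def Claim_equal_part1 : Prop := ∀ (professions : String), Dom_part1 professions → Spec_part1 professions (part1 professions)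

-- ===== LEMMAS AND PROOFS =====

-- ===== VERDICT (by name: the statement is the Claim_ definition above) =====
lemma altCounts_key : ∀ (l : List Char) (m r : Int),
    (l.foldl (fun (st : Int × Int) i =>
      if i = 'A' then (st.1 + 1, st.2)
      else if i = 'a' then (st.1, st.2 + st.1)
      else st) (m, r)).2
    = (List.zip (altCounts l m) l).foldl
        (fun s p => if p.2 = 'a' then s + p.1 else s) r := by
  intro l
  induction l with
  | nil => intro m r; simp [altCounts]
  | cons ch rest ih =>
    intro m r
    by_cases hA : ch = 'A'
    · simp [altCounts, hA, List.foldl, ih]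
    · by_cases ha : ch = 'a'
      · simp [altCounts, hA, ha, List.foldl, ih]
      · simp [altCounts, hA, ha, List.foldl, ih]

theorem part1_spec : Claim_equal_part1 := by
  intro professions _
  unfold Spec_part1 part1 part1_alt
  exact altCounts_key professions.toList 0 0
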